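-- pv_equiv track=rewrite | github.com/IvoSte/CompSocialChoice | Model/rules/util.py | pairwise_comparison_preference
-- ===== SOURCE A (Python) =====
-- def pairwise_comparison_preference(a, b, P):
--     count_a = 0
--     count_b = 0
--     for ballot in P:
--         temp_a, temp_b = pairwise_comparison_ballot(a,b,ballot)
--         count_a += temp_a
--         count_b += temp_b
--     return count_a, count_b
--
-- def pairwise_comparison_ballot(a, b, ballot):
--     """Who wins pairwise comparison
--     returns 1 for argument that wins and -1 for the losing argument.
--     returns 0 for both if one or both are missing"""
--     if not a in ballot or not b in ballot:
--         return 0,0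
--     for e in ballot:
--         if e == a:
--             return 1, -1
--         elif e == b:
--             return -1, 1
--     return 0, 0
-- ===== SOURCE B (Python) =====
-- def pairwise_comparison_preference(a, b, P):
--     wins = 0
--     losses = 0
--     for ballot in P:
--         pos = {}
--         for i, e in reversed(list(enumerate(ballot))):
--             pos[e] = i
--         if a in pos and b in pos:
--             if pos[a] <= pos[b]:
--                 wins += 1
--             else:
--                 losses += 1
--     return wins - losses, losses - wins
-- ===== Notes on version B (the rewrite author's own statement) =====
-- stated objective: alternative
-- what changed: Instead of A's helper that rescans each ballot for whichever of a/b comes first and sums two mirrored counters, B builds a first-occurrence position dictionary per ballot (reversed-enumerate inserts), decides by comparing pos[a] <= pos[b] under a both-present guard, tallies separate wins/losses counters and returns (wins-losses, losses-wins).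
import Mathlib
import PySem

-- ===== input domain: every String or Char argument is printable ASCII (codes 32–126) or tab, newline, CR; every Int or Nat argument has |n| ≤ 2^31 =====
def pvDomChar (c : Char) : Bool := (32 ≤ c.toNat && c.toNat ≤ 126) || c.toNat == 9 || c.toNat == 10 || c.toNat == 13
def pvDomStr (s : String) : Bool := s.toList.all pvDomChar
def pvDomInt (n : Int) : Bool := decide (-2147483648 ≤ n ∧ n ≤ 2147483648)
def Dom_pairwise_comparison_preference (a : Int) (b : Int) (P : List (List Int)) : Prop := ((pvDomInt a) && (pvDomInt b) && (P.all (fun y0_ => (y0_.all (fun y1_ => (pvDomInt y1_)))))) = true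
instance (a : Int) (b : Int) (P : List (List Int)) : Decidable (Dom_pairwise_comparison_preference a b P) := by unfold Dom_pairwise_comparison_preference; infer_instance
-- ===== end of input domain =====

-- B replaces A's helper scan (first of a/b wins, two mirrored counters) by a per-ballot
-- first-occurrence position dictionary and separate wins/losses counters, returning
-- (wins - losses, losses - wins); objective: alternative (same cost, different structure).

-- ===== PORT A =====
-- inner 'for e in ballot' loop of pairwise_comparison_ballot
def pcb_loop (a b : Int) : List Int → Int × Int
  | [] => (0, 0)
  | e :: rest => if e = a then (1, -1) else if e = b then (-1, 1) else pcb_loop a b rest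

def pairwise_comparison_ballot (a b : Int) (ballot : List Int) : Int × Int :=
  if ¬ a ∈ ballot ∨ ¬ b ∈ ballot then (0, 0) else pcb_loop a b ballot

def pairwise_comparison_preference (a : Int) (b : Int) (P : List (List Int)) : Int × Int :=
  P.foldl (fun (cnt : Int × Int) ballot =>
      let t := pairwise_comparison_ballot a b ballot
      (cnt.1 + t.1, cnt.2 + t.2)) (0, 0)

-- ===== PORT B =====
-- 'pos = {}; for i, e in reversed(list(enumerate(ballot))): pos[e] = i'
def pos_index (ballot : List Int) : PySem.Dict Int Int :=
  (PySem.List.enumerate ballot).reverse.foldl (fun d p => d.insert p.2 p.1) PySem.Dict.empty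

def pairwise_comparison_preference_alt (a : Int) (b : Int) (P : List (List Int)) : Int × Int :=
  let wl := P.foldl (fun (wl : Int × Int) ballot =>
      let pos := pos_index ballot
      if pos.contains a ∧ pos.contains b then
        if pos.getD a 0 ≤ pos.getD b 0 then (wl.1 + 1, wl.2) else (wl.1, wl.2 + 1)
      else wl) (0, 0)
  (wl.1 - wl.2, wl.2 - wl.1)

-- ===== PRECONDITION & SPEC =====
def Spec_pairwise_comparison_preference (a : Int) (b : Int) (P : List (List Int)) (out : Int × Int) : Prop := out = pairwise_comparison_preference_alt a b P
instance (a : Int) (b : Int) (P : List (List Int)) (out : Int × Int) : Decidable (Spec_pairwise_comparison_preference a b P out) := by unfold Spec_pairwise_comparison_preference; infer_instance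

-- ===== CLAIM (what is proved, stated in full; the proofs are below) =====
def Claim_equal_pairwise_comparison_preference : Prop := ∀ (a : Int) (b : Int) (P : List (List Int)), Dom_pairwise_comparison_preference a b P → Spec_pairwise_comparison_preference a b P (pairwise_comparison_preference a b P)

-- ===== LEMMAS AND PROOFS =====

-- first-occurrence dict built from offset s (proof helper; pos_index ballot = posFrom ballot 0)
def posFrom (ballot : List Int) (s : Int) : PySem.Dict Int Int :=
  (PySem.List.enumerate ballot s).reverse.foldl (fun d p => d.insert p.2 p.1) PySem.Dict.empty

lemma posFrom_get? : ∀ (ballot : List Int) (s x : Int),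
    (posFrom ballot s).get? x = (List.idxOf? x ballot).map (fun n => s + (n : Int)) := by
  intro ballot
  induction ballot with
  | nil => intro s x; simp [posFrom, PySem.List.enumerate_nil, PySem.Dict.get?_empty, List.idxOf?]
  | cons e rest ih =>
    intro s x
    have hfold : posFrom (e :: rest) s = (posFrom rest (s + 1)).insert e s := by
      simp [posFrom, PySem.List.enumerate_cons, List.foldl_append]
    rw [hfold, PySem.Dict.get?_insert]
    by_cases hx : x = e
    · subst hx
      have h0 : List.idxOf? x (x :: rest) = some 0 := by
        rw [← PySem.List.index?_eq_idxOf?]; exact PySem.List.index?_cons_self x rest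
      simp [h0]
    · have hne : e ≠ x := fun h => hx h.symm
      have hstep : List.idxOf? x (e :: rest) = (List.idxOf? x rest).map (· + 1) := by
        rw [← PySem.List.index?_eq_idxOf?, ← PySem.List.index?_eq_idxOf?]
        exact PySem.List.index?_cons_of_ne rest hne
      rw [if_neg hx, ih (s + 1) x, hstep]
      cases List.idxOf? x rest with
      | none => simp
      | some n => simp; ring

lemma pos_index_get? (ballot : List Int) (x : Int) :
    (pos_index ballot).get? x = (List.idxOf? x ballot).map (fun n => (n : Int)) := by
  have h : pos_index ballot = posFrom ballot 0 := rfl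
  rw [h, posFrom_get? ballot 0 x]
  cases List.idxOf? x ballot <;> simp

lemma pos_index_contains (ballot : List Int) (x : Int) :
    (pos_index ballot).contains x = true ↔ x ∈ ballot := by
  rw [PySem.Dict.contains_eq_isSome_get?, pos_index_get?]
  rw [← PySem.List.index?_eq_idxOf?]
  cases hidx : PySem.List.index? ballot x with
  | none =>
    have hmem : x ∉ ballot := (PySem.List.index?_eq_none_iff ballot x).mp hidx
    simp [hmem]
  | some n =>
    have hmem : x ∈ ballot := (PySem.List.index?_isSome_iff ballot x).mp (by rw [hidx]; rfl)
    simp [hmem]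

-- A's inner scan decided by first-occurrence indices
lemma pcb_loop_eq (a b : Int) : ∀ ballot : List Int, a ∈ ballot → b ∈ ballot →
    pcb_loop a b ballot =
      (if (List.idxOf? a ballot).getD 0 ≤ (List.idxOf? b ballot).getD 0
       then ((1 : Int), (-1 : Int)) else (-1, 1)) := by
  intro ballot
  induction ballot with
  | nil => intro h; cases h
  | cons e rest ih =>
    intro ha hb
    by_cases hea : e = a
    · subst hea
      have h0 : List.idxOf? e (e :: rest) = some 0 := by
        rw [← PySem.List.index?_eq_idxOf?]; exact PySem.List.index?_cons_self e rest
      simp [pcb_loop, h0]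
    · have ha' : a ∈ rest := by
        cases List.mem_cons.mp ha with
        | inl h => exact absurd h.symm hea
        | inr h => exact h
      obtain ⟨j, hj⟩ := Option.isSome_iff_exists.mp
        ((PySem.List.index?_isSome_iff rest a).mpr ha')
      have haj : List.idxOf? a (e :: rest) = some (j + 1) := by
        rw [← PySem.List.index?_eq_idxOf?, PySem.List.index?_cons_of_ne rest hea, hj]; rfl
      by_cases heb : e = b
      · subst heb
        have hb0 : List.idxOf? e (e :: rest) = some 0 := by
          rw [← PySem.List.index?_eq_idxOf?]; exact PySem.List.index?_cons_self e rest
        simp [pcb_loop, hea, hb0, haj]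
      · have hb' : b ∈ rest := by
          cases List.mem_cons.mp hb with
          | inl h => exact absurd h.symm heb
          | inr h => exact h
        obtain ⟨k, hk⟩ := Option.isSome_iff_exists.mp
          ((PySem.List.index?_isSome_iff rest b).mpr hb')
        have hbk : List.idxOf? b (e :: rest) = some (k + 1) := by
          rw [← PySem.List.index?_eq_idxOf?, PySem.List.index?_cons_of_ne rest heb, hk]; rfl
        have hja : List.idxOf? a rest = some j := by
          rw [← PySem.List.index?_eq_idxOf?]; exact hj
        have hkb : List.idxOf? b rest = some k := by
          rw [← PySem.List.index?_eq_idxOf?]; exact hk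
        have hrec := ih ha' hb'
        simp only [hja, hkb, Option.getD_some] at hrec
        by_cases hjk : j ≤ k
        · simp [pcb_loop, hea, heb, haj, hbk, hrec, hjk]
        · simp [pcb_loop, hea, heb, haj, hbk, hrec, hjk]

-- per-ballot: A's helper in terms of B's per-ballot decision
lemma ballot_vs_pos (a b : Int) (ballot : List Int) :
    pairwise_comparison_ballot a b ballot =
      (if (pos_index ballot).contains a ∧ (pos_index ballot).contains b then
        if (pos_index ballot).getD a 0 ≤ (pos_index ballot).getD b 0 then ((1:Int), (-1:Int))
        else (-1, 1)
      else (0, 0)) := by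
  by_cases h : a ∈ ballot ∧ b ∈ ballot
  · have hca : (pos_index ballot).contains a = true := (pos_index_contains ballot a).mpr h.1
    have hcb : (pos_index ballot).contains b = true := (pos_index_contains ballot b).mpr h.2
    obtain ⟨j, hj⟩ := Option.isSome_iff_exists.mp
      ((PySem.List.index?_isSome_iff ballot a).mpr h.1)
    obtain ⟨k, hk⟩ := Option.isSome_iff_exists.mp
      ((PySem.List.index?_isSome_iff ballot b).mpr h.2)
    have hja : List.idxOf? a ballot = some j := by rw [← PySem.List.index?_eq_idxOf?]; exact hj
    have hkb : List.idxOf? b ballot = some k := by rw [← PySem.List.index?_eq_idxOf?]; exact hk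
    have hga : (pos_index ballot).getD a 0 = (j : Int) := by
      rw [PySem.Dict.getD_eq_get?_getD, pos_index_get?, hja]; rfl
    have hgb : (pos_index ballot).getD b 0 = (k : Int) := by
      rw [PySem.Dict.getD_eq_get?_getD, pos_index_get?, hkb]; rfl
    have h' : ¬ (¬ a ∈ ballot ∨ ¬ b ∈ ballot) := by tauto
    rw [pairwise_comparison_ballot, if_neg h', pcb_loop_eq a b ballot h.1 h.2, hja, hkb]
    simp only [Option.getD_some, hga, hgb, hca, hcb, and_self, if_true]
    by_cases hjk : j ≤ k
    · rw [if_pos hjk, if_pos (by exact_mod_cast hjk)]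
    · rw [if_neg hjk, if_neg (by exact_mod_cast hjk)]
  · have h' : ¬ a ∈ ballot ∨ ¬ b ∈ ballot := by tauto
    have hc : ¬ ((pos_index ballot).contains a ∧ (pos_index ballot).contains b) := by
      rw [pos_index_contains, pos_index_contains]; tauto
    simp [pairwise_comparison_ballot, h', hc]

-- fold invariant: A's (count_a, count_b) is (wins - losses, losses - wins)
lemma fold_eq (a b : Int) : ∀ (P : List (List Int)) (w l : Int),
    P.foldl (fun (cnt : Int × Int) ballot =>
      let t := pairwise_comparison_ballot a b ballot
      (cnt.1 + t.1, cnt.2 + t.2)) (w - l, l - w) =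
    (let wl := P.foldl (fun (wl : Int × Int) ballot =>
        let pos := pos_index ballot
        if pos.contains a ∧ pos.contains b then
          if pos.getD a 0 ≤ pos.getD b 0 then (wl.1 + 1, wl.2) else (wl.1, wl.2 + 1)
        else wl) (w, l)
     (wl.1 - wl.2, wl.2 - wl.1)) := by
  intro P
  induction P with
  | nil => intro w l; simp
  | cons ballot rest ih =>
    intro w l
    rw [List.foldl_cons, List.foldl_cons, ballot_vs_pos a b ballot]
    by_cases hc : (pos_index ballot).contains a ∧ (pos_index ballot).contains b
    · by_cases hle : (pos_index ballot).getD a 0 ≤ (pos_index ballot).getD b 0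
      · have h1 : ((w - l) + (1:Int), (l - w) + (-1:Int)) = ((w + 1) - l, l - (w + 1)) := by
          simp only [Prod.mk.injEq]; omega
        simp only [hc, hle, and_self, if_true]
        have := ih (w + 1) l
        simpa [h1] using this
      · have h1 : ((w - l) + (-1:Int), (l - w) + (1:Int)) = (w - (l + 1), (l + 1) - w) := by
          simp only [Prod.mk.injEq]; omega
        simp only [hc, hle, and_self, if_true, if_false]
        have := ih w (l + 1)
        simpa [h1] using this
    · simp only [hc, if_false]
      have h1 : ((w - l) + (0:Int), (l - w) + (0:Int)) = (w - l, l - w) := by simp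
      have := ih w l
      simpa [h1] using this

-- ===== VERDICT (by name: the statement is the Claim_ definition above) =====
theorem pairwise_comparison_preference_spec : Claim_equal_pairwise_comparison_preference := by
  intro a b P _
  show pairwise_comparison_preference a b P = pairwise_comparison_preference_alt a b P
  have h := fold_eq a b P 0 0
  simpa [pairwise_comparison_preference, pairwise_comparison_preference_alt] using h
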